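-- pv_equiv track=rewrite | github.com/daniel-reich/ubiquitous-fiesta | BcjsjPPmPEMQwB86Y_22.py | get_vowel_substrings
-- ===== SOURCE A (Python) =====
-- def get_vowel_substrings(txt):
--     sov = set()
--     for i, x in enumerate(txt):
--         if x in 'aeiou':
--             for j in range(i, len(txt)):
--                 if txt[j] in 'aeiou':
--                     sov.add(txt[i:j+1])
--     return sorted(sov)
-- ===== SOURCE B (Python) =====
-- def get_vowel_substrings(txt):
--     sov = set()
--     opens = []  # the substring starting at each vowel seen so far, grown one char per step
--     for c in txt:
--         opens = [s + c for s in opens]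
--         if c in 'aeiou':
--             opens.append(c)
--             sov.update(opens)
--     return sorted(sov)
-- ===== Notes on version B (the rewrite author's own statement) =====
-- stated objective: alternative
-- what changed: B makes a single left-to-right pass carrying a list of open substrings (one per vowel start seen so far), extending each by the current character and flushing them all into the set whenever the current character is a vowel, instead of A's nested index loops taking slices for every vowel pair.
import Mathlib
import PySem

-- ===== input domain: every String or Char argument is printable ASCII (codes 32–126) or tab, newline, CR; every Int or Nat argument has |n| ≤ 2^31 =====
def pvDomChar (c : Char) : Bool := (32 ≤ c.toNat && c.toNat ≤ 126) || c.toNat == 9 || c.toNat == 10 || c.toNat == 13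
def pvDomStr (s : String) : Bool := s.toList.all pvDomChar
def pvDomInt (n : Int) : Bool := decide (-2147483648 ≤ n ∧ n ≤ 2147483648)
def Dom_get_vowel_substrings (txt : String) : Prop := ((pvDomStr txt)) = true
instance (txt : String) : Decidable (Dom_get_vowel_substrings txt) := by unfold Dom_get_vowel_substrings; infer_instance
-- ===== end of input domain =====

-- B replaces A's nested index loops (slice per vowel pair) by a single left-to-right pass
-- carrying the list of open substrings, one per vowel start seen so far (alternative algorithm, same results).

-- shared helper: Python "c in 'aeiou'" on a single character
def pvVowel (c : Char) : Bool := "aeiou".toList.contains c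

-- ===== PORT A =====
def get_vowel_substrings (txt : String) : List String :=
  let cs := txt.toList
  let sov : PySem.Set String :=
    (PySem.List.enumerate cs 0).foldl (fun s ix =>
      if pvVowel ix.2 then
        (PySem.List.pyRange ix.1 (cs.length : Int) 1).foldl (fun s j =>
          match PySem.List.pyGet? cs j with   -- txt[j]; j is always in range here
          | some c =>
            if pvVowel c then
              PySem.Set.add s (String.ofList (PySem.List.slice cs (some ix.1) (some (j + 1))))
            else s
          | none => s) s
      else s) PySem.Set.empty
  PySem.List.sorted sov (fun x => x) false

-- ===== PORT B =====
-- one loop step of Source B: extend every open substring by c; on a vowel, open a new one and flush all into the set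
def pvStepB (st : PySem.Set String × List (List Char)) (c : Char) :
    PySem.Set String × List (List Char) :=
  let opens := st.2.map (fun s => s ++ [c])
  if pvVowel c then
    let opens := opens ++ [[c]]
    (PySem.Set.update st.1 (opens.map String.ofList), opens)
  else (st.1, opens)

def get_vowel_substrings_alt (txt : String) : List String :=
  let st := txt.toList.foldl pvStepB (PySem.Set.empty, [])
  PySem.List.sorted st.1 (fun x => x) false

-- ===== PRECONDITION & SPEC =====
def Spec_get_vowel_substrings (txt : String) (out : List String) : Prop := out = get_vowel_substrings_alt txt
instance (txt : String) (out : List String) : Decidable (Spec_get_vowel_substrings txt out) := by unfold Spec_get_vowel_substrings; infer_instance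

-- ===== CLAIM (what is proved, stated in full; the proofs are below) =====
def Claim_equal_get_vowel_substrings : Prop := ∀ (txt : String), Dom_get_vowel_substrings txt → Spec_get_vowel_substrings txt (get_vowel_substrings txt)

-- ===== LEMMAS AND PROOFS =====

-- the common characterisation: y is a substring of cs that starts and ends at a vowel
def pvSub (cs : List Char) (y : String) : Prop :=
  ∃ i j : ℕ, i ≤ j ∧ j < cs.length ∧ pvVowel (cs.getD i ' ') ∧ pvVowel (cs.getD j ' ')
    ∧ y = String.ofList ((cs.drop i).take (j + 1 - i))

-- ---- generic fold lemmas over set-valued accumulators ----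

lemma mem_foldl_step {β : Type} (step : PySem.Set String → β → PySem.Set String)
    (Q : β → String → Prop)
    (h : ∀ s b y, y ∈ step s b ↔ y ∈ s ∨ Q b y) :
    ∀ (l : List β) (s : PySem.Set String) (y : String),
      y ∈ l.foldl step s ↔ y ∈ s ∨ ∃ b ∈ l, Q b y := by
  intro l
  induction l with
  | nil => simp
  | cons b t ih =>
    intro s y
    simp only [List.foldl_cons, ih, h, List.mem_cons]
    constructor
    · rintro ((hs | hq) | ⟨b', hb', hq⟩)
      · exact Or.inl hs
      · exact Or.inr ⟨b, Or.inl rfl, hq⟩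
      · exact Or.inr ⟨b', Or.inr hb', hq⟩
    · rintro (hs | ⟨b', (rfl | hb'), hq⟩)
      · exact Or.inl (Or.inl hs)
      · exact Or.inl (Or.inr hq)
      · exact Or.inr ⟨b', hb', hq⟩

lemma nodup_foldl_step {β : Type} (step : PySem.Set String → β → PySem.Set String)
    (h : ∀ s b, s.Nodup → (step s b).Nodup) :
    ∀ (l : List β) (s : PySem.Set String), s.Nodup → (l.foldl step s).Nodup := by
  intro l
  induction l with
  | nil => intro s hs; simpa using hs
  | cons b t ih => intro s hs; exact ih _ (h s b hs)

-- ---- A side: rewrite A's nested loops into a double fold over vowel positions ----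

lemma range_filter_split (n i : Int) (q : Int → Bool) (h0 : 0 ≤ i) (hn : i ≤ n) :
    ((PySem.List.pyRange 0 n 1).filter q).filter (fun j => decide (i ≤ j))
      = (PySem.List.pyRange i n 1).filter q := by
  rw [List.filter_filter, PySem.List.pyRange_one_append 0 i n h0 hn, List.filter_append]
  have h1 : (PySem.List.pyRange 0 i 1).filter (fun a => decide (i ≤ a) && q a) = [] := by
    rw [List.filter_eq_nil_iff]
    intro a ha
    rw [PySem.List.mem_pyRange_one] at ha
    simp [show ¬ (i ≤ a) by omega]
  have h2 : (PySem.List.pyRange i n 1).filter (fun a => decide (i ≤ a) && q a)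
      = (PySem.List.pyRange i n 1).filter q := by
    apply List.filter_congr
    intro a ha
    rw [PySem.List.mem_pyRange_one] at ha
    simp [show i ≤ a by omega]
  rw [h1, h2, List.nil_append]

lemma pyGet?_of_range (cs : List Char) (j : Int) (h0 : 0 ≤ j) (h1 : j < cs.length) :
    PySem.List.pyGet? cs j = some (PySem.List.pyGetD cs j ' ') := by
  simp [pysem, PySem.List.pyGet?, PySem.List.pyGetD, PySem.List.pyIdx?, h0, h1]

lemma enumerate_eq (cs : List Char) :
    PySem.List.enumerate cs 0
      = (PySem.List.pyRange 0 (cs.length : Int) 1).map (fun j => (j, PySem.List.pyGetD cs j ' ')) := by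
  have := PySem.List.enumerate_eq_map_pyRange (xs := cs) (d := ' ')
  simpa [pysem] using this

lemma sov_eq (cs : List Char) :
    ((PySem.List.enumerate cs 0).foldl (fun s ix =>
      if pvVowel ix.2 then
        (PySem.List.pyRange ix.1 (cs.length : Int) 1).foldl (fun s j =>
          match PySem.List.pyGet? cs j with
          | some c =>
            if pvVowel c then
              PySem.Set.add s (String.ofList (PySem.List.slice cs (some ix.1) (some (j + 1))))
            else s
          | none => s) s
      else s) (PySem.Set.empty : PySem.Set String))
    = (((PySem.List.pyRange 0 (cs.length : Int) 1).filter
          (fun i => pvVowel (PySem.List.pyGetD cs i ' '))).foldl (fun s i =>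
        ((PySem.List.pyRange 0 (cs.length : Int) 1).filter
          (fun i => pvVowel (PySem.List.pyGetD cs i ' '))).foldl (fun s j =>
          if i ≤ j then
            PySem.Set.add s (String.ofList (PySem.List.slice cs (some i) (some (j + 1))))
          else s) s) (PySem.Set.empty : PySem.Set String)) := by
  set q : Int → Bool := fun i => pvVowel (PySem.List.pyGetD cs i ' ') with hq
  set vp : List Int := (PySem.List.pyRange 0 (cs.length : Int) 1).filter q with hvp
  rw [PySem.List.foldl_if_eq_foldl_filter, enumerate_eq cs, List.filter_map, List.foldl_map]
  apply PySem.List.foldl_congr_mem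
  intro acc i hi
  have hi' : 0 ≤ i ∧ i < (cs.length : Int) := by
    simp only [List.mem_filter, PySem.List.mem_pyRange_one, Function.comp] at hi
    exact ⟨hi.1.1, hi.1.2⟩
  rw [PySem.List.foldl_ite_eq_foldl_filter, range_filter_split (cs.length : Int) i q hi'.1 (by omega)]
  simp only
  have hmid : List.foldl
      (fun s j =>
        match PySem.List.pyGet? cs j with
        | some c => if pvVowel c = true then s.add (String.ofList (PySem.List.slice cs (some i) (some (j + 1)))) else s
        | none => s)
      acc (PySem.List.pyRange i (cs.length : Int) 1)
      = List.foldl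
      (fun s j =>
        if q j then s.add (String.ofList (PySem.List.slice cs (some i) (some (j + 1)))) else s)
      acc (PySem.List.pyRange i (cs.length : Int) 1) := by
    apply PySem.List.foldl_congr_mem
    intro a j hj
    rw [PySem.List.mem_pyRange_one] at hj
    rw [pyGet?_of_range cs j (by omega) hj.2]
  rw [hmid, PySem.List.foldl_if_eq_foldl_filter]

-- membership in A's set is exactly pvSub
lemma memA (cs : List Char) (y : String) :
    y ∈ (((PySem.List.pyRange 0 (cs.length : Int) 1).filter
          (fun i => pvVowel (PySem.List.pyGetD cs i ' '))).foldl (fun s i =>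
        ((PySem.List.pyRange 0 (cs.length : Int) 1).filter
          (fun i => pvVowel (PySem.List.pyGetD cs i ' '))).foldl (fun s j =>
          if i ≤ j then
            PySem.Set.add s (String.ofList (PySem.List.slice cs (some i) (some (j + 1))))
          else s) s) (PySem.Set.empty : PySem.Set String))
    ↔ pvSub cs y := by
  set q : Int → Bool := fun i => pvVowel (PySem.List.pyGetD cs i ' ') with hq
  set vp : List Int := (PySem.List.pyRange 0 (cs.length : Int) 1).filter q with hvp
  have hmemvp : ∀ i : Int, i ∈ vp ↔ (0 ≤ i ∧ i < (cs.length : Int)) ∧ q i := by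
    intro i
    simp [hvp, List.mem_filter, PySem.List.mem_pyRange_one]
  have hqnat : ∀ i : Int, 0 ≤ i → q i = pvVowel (cs.getD i.toNat ' ') := by
    intro i h0
    obtain ⟨a, rfl⟩ : ∃ a : ℕ, i = (a : Int) := ⟨i.toNat, by omega⟩
    rw [hq]
    show pvVowel (PySem.List.pyGetD cs ((a : ℕ) : Int) ' ') = _
    rw [PySem.List.pyGetD_natCast]
    simp
  have hinner : ∀ (s : PySem.Set String) (i : Int) (y : String),
      y ∈ vp.foldl (fun s j =>
          if i ≤ j then
            PySem.Set.add s (String.ofList (PySem.List.slice cs (some i) (some (j + 1))))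
          else s) s
      ↔ y ∈ s ∨ ∃ j ∈ vp, i ≤ j ∧ y = String.ofList (PySem.List.slice cs (some i) (some (j + 1))) := by
    intro s i y
    apply mem_foldl_step
      (Q := fun j y => i ≤ j ∧ y = String.ofList (PySem.List.slice cs (some i) (some (j + 1))))
    intro s j y
    by_cases hij : i ≤ j
    · simp [hij, PySem.Set.mem_add]
    · simp [hij]
  rw [mem_foldl_step _
    (fun i y => ∃ j ∈ vp, i ≤ j ∧ y = String.ofList (PySem.List.slice cs (some i) (some (j + 1))))
    hinner vp PySem.Set.empty y]
  simp only [PySem.Set.empty, List.not_mem_nil, false_or]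
  constructor
  · rintro ⟨i, hi, j, hj, hij, rfl⟩
    rw [hmemvp] at hi hj
    obtain ⟨⟨hi0, hin⟩, hiq⟩ := hi
    obtain ⟨⟨hj0, hjn⟩, hjq⟩ := hj
    refine ⟨i.toNat, j.toNat, by omega, by omega, ?_, ?_, ?_⟩
    · rw [hqnat i hi0] at hiq; exact hiq
    · rw [hqnat j hj0] at hjq; exact hjq
    · have h1 : i = ((i.toNat : ℕ) : Int) := by omega
      have h2 : j + 1 = (((j.toNat + 1 : ℕ)) : Int) := by omega
      rw [h1, h2, PySem.List.slice_natCast]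
      congr 1
  · rintro ⟨a, b, hab, hbn, hav, hbv, rfl⟩
    refine ⟨(a : Int), ?_, (b : Int), ?_, by omega, ?_⟩
    · rw [hmemvp]
      refine ⟨⟨by omega, by omega⟩, ?_⟩
      rw [hqnat _ (by omega)]
      simpa using hav
    · rw [hmemvp]
      refine ⟨⟨by omega, by omega⟩, ?_⟩
      rw [hqnat _ (by omega)]
      simpa using hbv
    · have h2 : (b : Int) + 1 = (((b + 1 : ℕ)) : Int) := by omega
      rw [h2, PySem.List.slice_natCast]

lemma nodupA (cs : List Char) :
    (((PySem.List.pyRange 0 (cs.length : Int) 1).filter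
          (fun i => pvVowel (PySem.List.pyGetD cs i ' '))).foldl (fun s i =>
        ((PySem.List.pyRange 0 (cs.length : Int) 1).filter
          (fun i => pvVowel (PySem.List.pyGetD cs i ' '))).foldl (fun s j =>
          if i ≤ j then
            PySem.Set.add s (String.ofList (PySem.List.slice cs (some i) (some (j + 1))))
          else s) s) (PySem.Set.empty : PySem.Set String)).Nodup := by
  apply nodup_foldl_step
  · intro s i hs
    apply nodup_foldl_step
    · intro s' j hs'
      by_cases hij : i ≤ j
      · simpa [hij] using PySem.Set.nodup_add _ _ hs'
      · simpa [hij] using hs'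
    · exact hs
  · simp [PySem.Set.empty]

-- ---- B side: the single-pass invariant ----

lemma B_inv (p : List Char) :
    (∀ x, x ∈ (p.foldl pvStepB (PySem.Set.empty, [])).2 ↔
        ∃ i, i < p.length ∧ pvVowel (p.getD i ' ') ∧ x = p.drop i)
    ∧ (p.foldl pvStepB (PySem.Set.empty, [])).1.Nodup
    ∧ (∀ y, y ∈ (p.foldl pvStepB (PySem.Set.empty, [])).1 ↔ pvSub p y) := by
  induction p using List.reverseRecOn with
  | nil =>
    refine ⟨by simp, by simp [PySem.Set.empty], by simp [PySem.Set.empty, pvSub]⟩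
  | append_singleton q c ih =>
    obtain ⟨ih2, ihn, ih1⟩ := ih
    rw [List.foldl_append] at *
    simp only [List.foldl_cons, List.foldl_nil]
    set st := q.foldl pvStepB (PySem.Set.empty, []) with hst
    -- facts about getD / drop / take across the append
    have hgetD : ∀ i, i < q.length → (q ++ [c]).getD i ' ' = q.getD i ' ' := by
      intro i hi
      simp [List.getD_eq_getElem?_getD, List.getElem?_append_left hi]
    have hgetDc : (q ++ [c]).getD q.length ' ' = c := by
      simp [List.getD_eq_getElem?_getD]
    have hdrop : ∀ i, i ≤ q.length → (q ++ [c]).drop i = q.drop i ++ [c] := by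
      intro i hi
      rw [List.drop_append_of_le_length hi]
    have htake : ∀ i j, j < q.length → ((q ++ [c]).drop i).take (j + 1 - i) = (q.drop i).take (j + 1 - i) := by
      intro i j hj
      by_cases hi : i ≤ q.length
      · rw [hdrop i hi, List.take_append_of_le_length (by simp only [List.length_drop]; omega)]
      · rw [List.drop_eq_nil_of_le (by simp only [List.length_append, List.length_singleton]; omega),
          List.drop_eq_nil_of_le (by omega)]
    have hfull : ∀ i, i ≤ q.length → ((q ++ [c]).drop i).take (q.length + 1 - i) = q.drop i ++ [c] := by
      intro i hi
      rw [hdrop i hi, List.take_of_length_le (by simp only [List.length_append, List.length_drop, List.length_singleton]; omega)]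
    -- the new opens list characterisation (both cases share it apart from the extra [c])
    have hmap : ∀ x, x ∈ st.2.map (fun s => s ++ [c]) ↔
        ∃ i, i < q.length ∧ pvVowel (q.getD i ' ') ∧ x = (q ++ [c]).drop i := by
      intro x
      simp only [List.mem_map]
      constructor
      · rintro ⟨s, hs, rfl⟩
        obtain ⟨i, hi, hv, rfl⟩ := (ih2 s).mp hs
        exact ⟨i, hi, hv, (hdrop i (by omega)).symm⟩
      · rintro ⟨i, hi, hv, rfl⟩
        exact ⟨q.drop i, (ih2 _).mpr ⟨i, hi, hv, rfl⟩, (hdrop i (by omega)).symm⟩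
    by_cases hv : pvVowel c
    · -- vowel step
      have hsnd : (pvStepB st c).2 = st.2.map (fun s => s ++ [c]) ++ [[c]] := by
        simp [pvStepB, hv]
      have hfst : (pvStepB st c).1 = PySem.Set.update st.1 ((st.2.map (fun s => s ++ [c]) ++ [[c]]).map String.ofList) := by
        simp [pvStepB, hv]
      have h2 : ∀ x, x ∈ (pvStepB st c).2 ↔
          ∃ i, i < (q ++ [c]).length ∧ pvVowel ((q ++ [c]).getD i ' ') ∧ x = (q ++ [c]).drop i := by
        intro x
        rw [hsnd]
        simp only [List.mem_append, List.mem_singleton, hmap, List.length_append, List.length_singleton]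
        constructor
        · rintro (⟨i, hi, hvi, rfl⟩ | rfl)
          · exact ⟨i, by omega, by rw [hgetD i hi]; exact hvi, rfl⟩
          · refine ⟨q.length, by omega, by rw [hgetDc]; exact hv, ?_⟩
            rw [hdrop q.length le_rfl]
            simp
        · rintro ⟨i, hi, hvi, rfl⟩
          by_cases hiq : i < q.length
          · exact Or.inl ⟨i, hiq, by rw [hgetD i hiq] at hvi; exact hvi, rfl⟩
          · have : i = q.length := by omega
            subst this
            right
            rw [hdrop q.length le_rfl]
            simp
      refine ⟨h2, ?_, ?_⟩
      · rw [hfst]; exact PySem.Set.nodup_update _ _ ihn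
      · intro y
        rw [hfst, PySem.Set.mem_update]
        simp only [List.mem_map]
        constructor
        · rintro (hy | ⟨x, hx, rfl⟩)
          · obtain ⟨i, j, hij, hjn, hvi, hvj, rfl⟩ := (ih1 y).mp hy
            exact ⟨i, j, hij, by simp; omega, by rw [hgetD i (by omega)]; exact hvi,
              by rw [hgetD j hjn]; exact hvj, by rw [htake i j hjn]⟩
          · obtain ⟨i, hi, hvi, rfl⟩ := ((h2 x).mp (by rw [hsnd]; exact hx))
            have hi' : i ≤ q.length := by simp only [List.length_append, List.length_singleton] at hi; omega
            refine ⟨i, q.length, hi', by simp, ?_, by rw [hgetDc]; exact hv, ?_⟩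
            · rcases Nat.lt_or_ge i q.length with h | h
              · rw [hgetD i h]; rw [hgetD i h] at hvi; exact hvi
              · have : i = q.length := by simp at hi; omega
                subst this; exact hvi
            · rw [List.take_of_length_le (by simp only [List.length_drop, List.length_append, List.length_singleton]; omega)]
        · rintro ⟨i, j, hij, hjn, hvi, hvj, rfl⟩
          simp only [List.length_append, List.length_singleton] at hjn
          by_cases hjq : j < q.length
          · left
            apply (ih1 _).mpr
            exact ⟨i, j, hij, hjq, by rw [hgetD i (by omega)] at hvi; exact hvi,
              by rw [hgetD j hjq] at hvj; exact hvj, by rw [htake i j hjq]⟩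
          · have : j = q.length := by omega
            subst this
            right
            refine ⟨(q ++ [c]).drop i, ?_, ?_⟩
            · exact hsnd ▸ ((h2 _).mpr ⟨i, by simp only [List.length_append, List.length_singleton]; omega, hvi, rfl⟩)
            · rw [List.take_of_length_le (by simp only [List.length_drop, List.length_append, List.length_singleton]; omega)]
    · -- non-vowel step
      have hsnd : (pvStepB st c).2 = st.2.map (fun s => s ++ [c]) := by
        simp [pvStepB, hv]
      have hfst : (pvStepB st c).1 = st.1 := by
        simp [pvStepB, hv]
      refine ⟨?_, by rw [hfst]; exact ihn, ?_⟩
      · intro x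
        rw [hsnd, hmap x]
        constructor
        · rintro ⟨i, hi, hvi, rfl⟩
          exact ⟨i, by simp; omega, by rw [hgetD i hi]; exact hvi, rfl⟩
        · rintro ⟨i, hi, hvi, rfl⟩
          simp only [List.length_append, List.length_singleton] at hi
          by_cases hiq : i < q.length
          · exact ⟨i, hiq, by rw [hgetD i hiq] at hvi; exact hvi, rfl⟩
          · exfalso
            have : i = q.length := by omega
            subst this
            rw [hgetDc] at hvi
            exact hv (by exact hvi)
      · intro y
        rw [hfst, ih1 y]
        constructor
        · rintro ⟨i, j, hij, hjn, hvi, hvj, rfl⟩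
          exact ⟨i, j, hij, by simp; omega, by rw [hgetD i (by omega)]; exact hvi,
            by rw [hgetD j hjn]; exact hvj, by rw [htake i j hjn]⟩
        · rintro ⟨i, j, hij, hjn, hvi, hvj, rfl⟩
          simp only [List.length_append, List.length_singleton] at hjn
          by_cases hjq : j < q.length
          · exact ⟨i, j, hij, hjq, by rw [hgetD i (by omega)] at hvi; exact hvi,
              by rw [hgetD j hjq] at hvj; exact hvj, by rw [htake i j hjq]⟩
          · exfalso
            have : j = q.length := by omega
            subst this
            rw [hgetDc] at hvj
            exact hv (by exact hvj)

lemma eq_alt (txt : String) : get_vowel_substrings txt = get_vowel_substrings_alt txt := by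
  show PySem.List.sorted _ _ _ = PySem.List.sorted _ _ _
  rw [sov_eq txt.toList]
  apply PySem.List.sorted_eq_sorted_of_perm _ _ _ (fun a b h => h)
  rw [List.perm_ext_iff_of_nodup (nodupA txt.toList) (B_inv txt.toList).2.1]
  intro y
  rw [memA txt.toList y, (B_inv txt.toList).2.2 y]

-- ===== VERDICT (by name: the statement is the Claim_ definition above) =====
theorem get_vowel_substrings_spec : Claim_equal_get_vowel_substrings := by
  intro txt _
  unfold Spec_get_vowel_substrings
  exact eq_alt txt
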